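-- pv_equiv track=rewrite | github.com/ngilles/adventofcode-2020 | day_24.py | split_nav
-- ===== SOURCE A (Python) =====
-- from contextlib import suppress
--
-- def split_nav(s):
--     nav_it = iter(s)
--     with suppress(StopIteration):
--         while True:
--             d = next(nav_it)
--             if d in "sn":
--                 d += next(nav_it)
--             yield d
-- ===== SOURCE B (Python) =====
-- import re
--
-- _NAV_TOKEN = re.compile(r'[sn][\s\S]|[^sn]')
--
-- def split_nav(s):
--     for m in _NAV_TOKEN.finditer(s):
--         yield m.group()
-- ===== Notes on version B (the rewrite author's own statement) =====
-- stated objective: idiomatic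
-- what changed: Replaced the hand-rolled iter/next generator with a compiled regex tokenizer ([sn][\s\S]|[^sn]) driven by re.finditer, still yielding lazily; the regex scanner's skip-on-failure naturally drops a trailing lone s/n just as A's suppressed StopIteration does.
import Mathlib
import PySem

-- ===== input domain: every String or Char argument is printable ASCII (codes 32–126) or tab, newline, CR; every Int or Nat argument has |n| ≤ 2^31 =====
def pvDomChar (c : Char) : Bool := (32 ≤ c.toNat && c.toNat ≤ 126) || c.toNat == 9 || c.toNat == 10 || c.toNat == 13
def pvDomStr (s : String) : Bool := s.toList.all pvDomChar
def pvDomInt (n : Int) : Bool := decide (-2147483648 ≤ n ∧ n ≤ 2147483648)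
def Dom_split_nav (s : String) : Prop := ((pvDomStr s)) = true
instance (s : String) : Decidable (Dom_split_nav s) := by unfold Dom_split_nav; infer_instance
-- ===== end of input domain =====

-- B replaces A's hand-rolled iter/next generator loop with a regex tokenizer
-- ([sn][\s\S]|[^sn]) driven by re.finditer (idiomatic; same cost).

-- ===== PORT A =====
-- A: d = next(it); if d in "sn": d += next(it) (StopIteration suppressed, token dropped); yield d
def splitNavGoA : List Char → List String
  | [] => []
  | c :: rest =>
    if c = 's' ∨ c = 'n' then
      match rest with
      | [] => []                                   -- second next() raises StopIteration: suppressed, d not yielded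
      | c2 :: rest2 => String.ofList [c, c2] :: splitNavGoA rest2
    else
      String.ofList [c] :: splitNavGoA rest

def split_nav (s : String) : List String := splitNavGoA s.toList

-- ===== PORT B =====
-- hand port of the regex r'[sn][\s\S]|[^sn]': attempt a match at the current position
-- (exact for this pattern: alt 1 = s/n followed by any char, alt 2 = one non-s/n char)
def splitNavMatch? (cs : List Char) : Option (String × List Char) :=
  match cs with
  | [] => none
  | c :: rest =>
    if c = 's' ∨ c = 'n' then
      match rest with
      | c2 :: rest2 => some (String.ofList [c, c2], rest2)   -- alt 1
      | [] => none                                        -- lone s/n: both alternatives fail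
    else
      some (String.ofList [c], rest)                          -- alt 2

-- finditer's scanner: on a failed match advance one position, else continue after the match
def splitNavScan : List Char → List String
  | [] => []
  | c :: tail =>
    match h : splitNavMatch? (c :: tail) with
    | some (m, rest) => m :: splitNavScan rest
    | none => splitNavScan tail
decreasing_by
  · simp only [splitNavMatch?] at h
    split at h
    · split at h
      · cases h; simp; omega
      · cases h
    · cases h; simp
  · simp

def split_nav_alt (s : String) : List String := splitNavScan s.toList

-- ===== PRECONDITION & SPEC =====
def Spec_split_nav (s : String) (out : List String) : Prop := out = split_nav_alt s
instance (s : String) (out : List String) : Decidable (Spec_split_nav s out) := by unfold Spec_split_nav; infer_instance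

-- ===== CLAIM (what is proved, stated in full; the proofs are below) =====
def Claim_equal_split_nav : Prop := ∀ (s : String), Dom_split_nav s → Spec_split_nav s (split_nav s)

-- ===== LEMMAS AND PROOFS =====
theorem splitNavScan_cons (c : Char) (tail : List Char) :
    splitNavScan (c :: tail) =
      match splitNavMatch? (c :: tail) with
      | some (m, rest) => m :: splitNavScan rest
      | none => splitNavScan tail := by
  rw [splitNavScan]
  split <;> simp_all

theorem splitNavGoA_eq_scan : ∀ cs : List Char, splitNavGoA cs = splitNavScan cs
  | [] => by simp [splitNavGoA, splitNavScan]
  | [c] => by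
    by_cases h : c = 's' ∨ c = 'n' <;>
      simp [splitNavGoA, splitNavScan_cons, splitNavScan, splitNavMatch?, h]
  | c :: c2 :: rest => by
    have ih := splitNavGoA_eq_scan rest
    have ih2 := splitNavGoA_eq_scan (c2 :: rest)
    by_cases h : c = 's' ∨ c = 'n' <;>
      simp [splitNavGoA, splitNavScan_cons, splitNavMatch?, h, ih, ih2]

-- ===== VERDICT (by name: the statement is the Claim_ definition above) =====
theorem split_nav_spec : Claim_equal_split_nav := by
  intro s _
  unfold Spec_split_nav split_nav split_nav_alt
  exact splitNavGoA_eq_scan s.toList
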